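-- pv_equiv track=rewrite | github.com/ArjunMD/MyChessNotebook | app.py | _all_tactic_tags_from_catalog
-- ===== SOURCE A (Python) =====
-- from typing import Dict, Tuple, List
--
-- def _all_tactic_tags_from_catalog(catalog: List[dict]) -> List[str]:
--     tags: set[str] = set()
--     for it in catalog:
--         for t in it.get("tags") or []:
--             if t:
--                 tags.add(str(t))
--
--     def _sort_key(t: str):
--         # white tags first, then black, then alphabetical
--         return (0 if t.startswith("white ") else 1, t)
--
--     return sorted(tags, key=_sort_key)
-- ===== SOURCE B (Python) =====
-- from typing import Dict, Tuple, List
--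
-- def _insert_tag(ordered: List[str], s: str) -> List[str]:
--     # ordered is kept strictly increasing under (white-first, alphabetical); insert s, skipping duplicates
--     k = (0 if s.startswith("white ") else 1, s)
--     i = 0
--     n = len(ordered)
--     while i < n and (0 if ordered[i].startswith("white ") else 1, ordered[i]) < k:
--         i += 1
--     if i < n and ordered[i] == s:
--         return ordered
--     return ordered[:i] + [s] + ordered[i:]
--
-- def _all_tactic_tags_from_catalog(catalog: List[dict]) -> List[str]:
--     ordered: List[str] = []
--     for it in catalog:
--         for t in it.get("tags") or []:
--             if t:
--                 ordered = _insert_tag(ordered, str(t))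
--     return ordered
-- ===== Notes on version B (the rewrite author's own statement) =====
-- stated objective: alternative
-- what changed: Drops the set and the final sort entirely: a single pass keeps the result list strictly ordered (white-first, then alphabetical) and duplicate-free by inserting each tag at its ordered position as it is encountered (online ordered insertion instead of collect-into-set-then-sort).
import Mathlib
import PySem

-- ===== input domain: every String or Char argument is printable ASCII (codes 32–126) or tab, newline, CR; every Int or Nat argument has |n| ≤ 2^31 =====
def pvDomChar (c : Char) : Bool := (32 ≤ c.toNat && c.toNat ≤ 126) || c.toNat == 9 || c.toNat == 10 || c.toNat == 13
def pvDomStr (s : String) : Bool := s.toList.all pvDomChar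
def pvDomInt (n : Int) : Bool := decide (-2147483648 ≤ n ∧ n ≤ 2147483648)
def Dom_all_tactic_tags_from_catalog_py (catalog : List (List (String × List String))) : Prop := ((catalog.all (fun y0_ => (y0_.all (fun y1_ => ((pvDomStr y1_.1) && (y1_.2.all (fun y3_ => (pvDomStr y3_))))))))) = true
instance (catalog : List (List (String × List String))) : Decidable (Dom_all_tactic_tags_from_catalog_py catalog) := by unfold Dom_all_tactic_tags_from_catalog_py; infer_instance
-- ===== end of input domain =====

-- B drops the set and the final sort: one pass keeps the result list ordered (white-first, then alphabetical) and duplicate-free by ordered insertion (alternative decomposition; not claimed faster).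


-- ===== PORT A =====
def all_tactic_tags_from_catalog_py (catalog : List (List (String × List String))) : List String :=
  -- tags = set(); for it in catalog: for t in it.get("tags") or []: if t: tags.add(str(t))
  let tags : PySem.Set String := catalog.foldl (fun tags it =>
    ((PySem.Dict.get? (PySem.Dict.mk it) "tags").getD []).foldl (fun tags t =>
      if t ≠ "" then PySem.Set.add tags t else tags) tags) PySem.Set.empty
  -- sorted(tags, key=lambda t: (0 if t.startswith("white ") else 1, t))
  PySem.List.sorted2 tags (fun t => if PySem.Str.startswith t "white " then (0 : Int) else 1)
    (fun t => t) false

-- ===== PORT B =====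
-- the tuple '(0 if a.startswith("white ") else 1, a) < (0 if b.startswith("white ") else 1, b)' comparison of Source B
def pvKeyLt (a b : String) : Bool :=
  let fa : Int := if PySem.Str.startswith a "white " then 0 else 1
  let fb : Int := if PySem.Str.startswith b "white " then 0 else 1
  decide (fa < fb ∨ (fa = fb ∧ a < b))

-- the while-scan of _insert_tag as the obvious structural recursion: skip while key < key(s); drop duplicate; else splice s in front
def pvInsertTag (ordered : List String) (s : String) : List String :=
  match ordered with
  | [] => [s]
  | x :: xs =>
    if pvKeyLt x s then x :: pvInsertTag xs s
    else if x == s then x :: xs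
    else s :: x :: xs

def all_tactic_tags_from_catalog_py_alt (catalog : List (List (String × List String))) : List String :=
  catalog.foldl (fun ordered it =>
    ((PySem.Dict.get? (PySem.Dict.mk it) "tags").getD []).foldl (fun ordered t =>
      if t ≠ "" then pvInsertTag ordered t else ordered) ordered) []

-- ===== PRECONDITION & SPEC =====
def Spec_all_tactic_tags_from_catalog_py (catalog : List (List (String × List String))) (out : List String) : Prop := out = all_tactic_tags_from_catalog_py_alt catalog
instance (catalog : List (List (String × List String))) (out : List String) : Decidable (Spec_all_tactic_tags_from_catalog_py catalog out) := by unfold Spec_all_tactic_tags_from_catalog_py; infer_instance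

-- ===== CLAIM =====
def Claim_equal_all_tactic_tags_from_catalog_py : Prop := ∀ (catalog : List (List (String × List String))), Dom_all_tactic_tags_from_catalog_py catalog → Spec_all_tactic_tags_from_catalog_py catalog (all_tactic_tags_from_catalog_py catalog)

-- ===== LEMMAS AND PROOFS =====

-- the sort key of A, as a single lexicographic value
def pvKey (t : String) : Lex (Int × String) :=
  toLex (if PySem.Str.startswith t "white " then (0 : Int) else 1, t)

theorem pvKeyLt_iff (a b : String) : pvKeyLt a b = true ↔ pvKey a < pvKey b := by
  simp only [pvKeyLt, pvKey, decide_eq_true_eq, Prod.Lex.toLex_lt_toLex]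

theorem pvKey_inj (a b : String) (h : pvKey a = pvKey b) : a = b := by
  simpa using congrArg (fun k => (ofLex k).2) h

theorem pvKey_trichotomy (a b : String) (h1 : pvKeyLt a b = false) (h2 : a ≠ b) :
    pvKey b < pvKey a := by
  rcases lt_trichotomy (pvKey a) (pvKey b) with h | h | h
  · exact absurd ((pvKeyLt_iff a b).2 h) (by simp [h1])
  · exact absurd (pvKey_inj a b h) h2
  · exact h

theorem mem_pvInsertTag (l : List String) (s t : String) :
    t ∈ pvInsertTag l s ↔ t ∈ l ∨ t = s := by
  induction l with
  | nil => simp [pvInsertTag]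
  | cons x xs ih =>
    simp only [pvInsertTag]
    split
    · simp [ih]; tauto
    · split
      · next h =>
        have hxs : x = s := by simpa using h
        subst hxs
        simp [List.mem_cons]; tauto
      · simp [List.mem_cons]; tauto

theorem pairwise_pvInsertTag (l : List String) (s : String)
    (h : l.Pairwise (fun a b => pvKey a < pvKey b)) :
    (pvInsertTag l s).Pairwise (fun a b => pvKey a < pvKey b) := by
  induction l with
  | nil => simp [pvInsertTag]
  | cons x xs ih =>
    rcases List.pairwise_cons.1 h with ⟨hx, hxs⟩
    simp only [pvInsertTag]
    split
    · next hlt =>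
      refine List.pairwise_cons.2 ⟨?_, ih hxs⟩
      intro y hy
      rcases (mem_pvInsertTag xs s y).1 hy with hyl | rfl
      · exact hx y hyl
      · exact (pvKeyLt_iff x y).1 hlt
    · split
      · exact h
      · next hlt hne =>
        refine List.pairwise_cons.2 ⟨?_, h⟩
        intro y hy
        have hsx : pvKey s < pvKey x :=
          pvKey_trichotomy x s (by simpa using hlt) (fun e => hne (by simp [e]))
        rcases List.mem_cons.1 hy with rfl | hyl
        · exact hsx
        · exact hsx.trans (hx y hyl)

theorem pvInsertTag_of_mem (l : List String) (s : String)
    (h : l.Pairwise (fun a b => pvKey a < pvKey b)) (hm : s ∈ l) :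
    pvInsertTag l s = l := by
  induction l with
  | nil => simp at hm
  | cons x xs ih =>
    rcases List.pairwise_cons.1 h with ⟨hx, hxs⟩
    simp only [pvInsertTag]
    rcases List.mem_cons.1 hm with rfl | hmx
    · have : pvKeyLt s s = false := by
        by_contra hc
        have := (pvKeyLt_iff s s).1 (by simpa using hc)
        exact lt_irrefl _ this
      simp [this]
    · have hlt : pvKey x < pvKey s := hx s hmx
      have : pvKeyLt x s = true := (pvKeyLt_iff x s).2 hlt
      simp [this, ih hxs hmx]

theorem pvInsertTag_perm_of_not_mem (l : List String) (s : String) (hm : s ∉ l) :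
    (pvInsertTag l s).Perm (s :: l) := by
  induction l with
  | nil => simp [pvInsertTag]
  | cons x xs ih =>
    have hmx : s ∉ xs := fun h => hm (List.mem_cons_of_mem _ h)
    simp only [pvInsertTag]
    split
    · exact ((ih hmx).cons x).trans (List.Perm.swap s x xs)
    · split
      · next h => exact absurd (by simpa using h : x = s) (fun e => hm (by simp [e]))
      · exact List.Perm.refl _

-- the invariant of B's pass: its accumulator is a strictly key-increasing permutation of A's set
def pvInv (s : PySem.Set String) (o : List String) : Prop :=
  o.Pairwise (fun a b => pvKey a < pvKey b) ∧ o.Perm s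

theorem pvInv_step (s : PySem.Set String) (o : List String) (t : String) (h : pvInv s o) :
    pvInv (PySem.Set.add s t) (pvInsertTag o t) := by
  obtain ⟨hp, hperm⟩ := h
  by_cases hm : t ∈ s
  · have hmo : t ∈ o := hperm.mem_iff.2 hm
    rw [PySem.Set.add_of_mem hm, pvInsertTag_of_mem o t hp hmo]
    exact ⟨hp, hperm⟩
  · have hmo : t ∉ o := fun h => hm (hperm.mem_iff.1 h)
    rw [PySem.Set.add_of_not_mem hm]
    refine ⟨pairwise_pvInsertTag o t hp, ?_⟩
    exact (pvInsertTag_perm_of_not_mem o t hmo).trans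
      ((hperm.cons t).trans (List.perm_append_singleton t s).symm)

theorem pvInv_inner (ts : List String) (s : PySem.Set String) (o : List String) (h : pvInv s o) :
    pvInv (ts.foldl (fun tags t => if t ≠ "" then PySem.Set.add tags t else tags) s)
          (ts.foldl (fun ordered t => if t ≠ "" then pvInsertTag ordered t else ordered) o) := by
  induction ts generalizing s o with
  | nil => exact h
  | cons x xs ih =>
    simp only [List.foldl_cons]
    by_cases hx : x = ""
    · simp only [hx, ne_eq, not_true_eq_false, if_false]
      exact ih s o h
    · simp only [ne_eq, hx, not_false_eq_true, if_true]
      exact ih _ _ (pvInv_step s o x h)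

theorem pvInv_outer (catalog : List (List (String × List String)))
    (s : PySem.Set String) (o : List String) (h : pvInv s o) :
    pvInv (catalog.foldl (fun tags it =>
            ((PySem.Dict.get? (PySem.Dict.mk it) "tags").getD []).foldl
              (fun tags t => if t ≠ "" then PySem.Set.add tags t else tags) tags) s)
          (catalog.foldl (fun ordered it =>
            ((PySem.Dict.get? (PySem.Dict.mk it) "tags").getD []).foldl
              (fun ordered t => if t ≠ "" then pvInsertTag ordered t else ordered) ordered) o) := by
  induction catalog generalizing s o with
  | nil => exact h
  | cons x xs ih =>
    simp only [List.foldl_cons]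
    exact ih _ _ (pvInv_inner _ s o h)

-- sorted2 with keys (k1, id) is sorted with the lexicographic pair key
theorem pv_sorted2_eq_lex (xs : List String) (k1 : String → Int) :
    PySem.List.sorted2 xs k1 (fun t => t) false =
    PySem.List.sorted xs (fun t => toLex (k1 t, t)) false := by
  simp only [PySem.List.sorted2, PySem.List.sorted]
  congr 1
  funext acc x
  congr 1
  funext a b
  have hlex : (toLex (k1 a, a) < toLex (k1 b, b)) ↔ (k1 a < k1 b ∨ (k1 a = k1 b ∧ a < b)) :=
    Prod.Lex.toLex_lt_toLex
  rw [Bool.eq_iff_iff]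
  by_cases h1 : k1 a < k1 b
  · simp [h1, hlex]
  · by_cases h2 : k1 b < k1 a
    · have hne : k1 a ≠ k1 b := by omega
      simp [h1, h2, hlex, hne]
    · have he : k1 a = k1 b := le_antisymm (not_lt.1 h2) (not_lt.1 h1)
      simp only [Bool.false_eq_true, if_false, decide_eq_true_eq]
      rw [he]
      rw [he] at hlex
      simp [hlex]

-- ===== VERDICT =====
theorem all_tactic_tags_from_catalog_py_spec : Claim_equal_all_tactic_tags_from_catalog_py := by
  intro catalog _
  unfold Spec_all_tactic_tags_from_catalog_py
  unfold all_tactic_tags_from_catalog_py all_tactic_tags_from_catalog_py_alt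
  obtain ⟨hp, hperm⟩ := pvInv_outer catalog PySem.Set.empty [] ⟨List.Pairwise.nil, List.Perm.refl _⟩
  rw [pv_sorted2_eq_lex]
  apply PySem.List.sorted_eq_of_perm_of_pairwise_lt
  · exact hperm
  · exact hp
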